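-- pv_equiv track=rewrite | github.com/InfinityCity18/Geometric_Algorithms_ConvexHull_Project | code/incremental.py | x_sort
-- ===== SOURCE A (Python) =====
-- from itertools import groupby
--
-- def x_sort(points):
--     points.sort()
--     res = []
--     for x, pts in groupby(points, key=lambda p: p[0]):
--         pts = list(pts)
--         res.append(pts[0])
--         if len(pts) > 1 and pts[-1] != pts[0]:
--             res.append(pts[-1])
--     return res
-- ===== SOURCE B (Python) =====
-- def x_sort(points):
--     # Sort in place (like A), collapse duplicates, then keep exactly the points
--     # that sit on a boundary of their equal-x block: a point survives iff its
--     # predecessor or its successor in the deduplicated sorted list has another x.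
--     points.sort()
--     uniq = sorted(set(points))
--     xs = [p[0] for p in uniq]
--     return [p for p, a, b in zip(uniq, [None] + xs[:-1], xs[1:] + [None])
--             if a != p[0] or b != p[0]]
-- ===== Notes on version B (the rewrite author's own statement) =====
-- stated objective: alternative
-- what changed: instead of consuming groupby runs and taking each run's first/last point, B deduplicates the sorted list (sorted(set(points))) and filters it against its own shifted x-sequences, keeping exactly the points whose predecessor or successor has a different x; deduplication makes A's 'last != first' test become a pure block-boundary test
import Mathlib
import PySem

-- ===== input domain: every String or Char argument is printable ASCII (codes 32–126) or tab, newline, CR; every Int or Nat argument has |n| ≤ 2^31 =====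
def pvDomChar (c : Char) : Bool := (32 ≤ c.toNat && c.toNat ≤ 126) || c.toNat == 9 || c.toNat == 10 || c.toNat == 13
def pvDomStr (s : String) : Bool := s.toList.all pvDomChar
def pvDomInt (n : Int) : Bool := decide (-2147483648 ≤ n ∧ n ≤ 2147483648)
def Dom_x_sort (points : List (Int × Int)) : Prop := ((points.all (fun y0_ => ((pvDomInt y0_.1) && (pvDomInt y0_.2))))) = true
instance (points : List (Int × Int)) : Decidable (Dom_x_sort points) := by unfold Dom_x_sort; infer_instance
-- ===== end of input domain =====

-- B replaces the streaming groupby first/last extraction by dedup-then-boundary-filter: sorted(set(points))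
-- filtered against its shifted x-sequences (alternative decomposition, same cost). Both A and B sort
-- 'points' in place; the theorem is about the return value.


-- ===== PORT A =====
-- itertools.groupby(points, key=lambda p: p[0]): consecutive runs of equal first component
def pyGroupbyFst : List (Int × Int) → List (List (Int × Int))
  | [] => []
  | p :: t =>
      (p :: t.takeWhile (fun q => q.1 == p.1)) ::
      pyGroupbyFst (t.dropWhile (fun q => q.1 == p.1))
termination_by l => l.length
decreasing_by
  simp only [List.length_cons]
  have := List.length_dropWhile_le (fun q => q.1 == p.1) t
  omega

def x_sort (points : List (Int × Int)) : List (Int × Int) :=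
  -- points.sort(): Python's tuple order is lexicographic, i.e. the Lex order via toLex
  let s := PySem.List.sorted points (fun p => toLex p)
  (pyGroupbyFst s).foldl
    (fun res pts =>
      let res := res ++ [pts.headI]                          -- pts[0]; every group is nonempty
      if pts.length > 1 ∧ pts.getLastD (0, 0) ≠ pts.headI    -- len(pts) > 1 and pts[-1] != pts[0]
      then res ++ [pts.getLastD (0, 0)] else res) []

-- ===== PORT B =====
def x_sort_alt (points : List (Int × Int)) : List (Int × Int) :=
  let s := PySem.List.sorted points (fun p => toLex p)       -- points.sort()
  let uniq := PySem.List.sorted (PySem.Set.ofList s) (fun p => toLex p)   -- sorted(set(points))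
  let xs := uniq.map (fun p => p.1)                          -- [p[0] for p in uniq]
  -- [p for p, a, b in zip(uniq, [None] + xs[:-1], xs[1:] + [None]) if a != p[0] or b != p[0]]
  ((uniq.zip (((none : Option Int) :: xs.dropLast.map some).zip (xs.tail.map some ++ [none]))).filter
    (fun t => decide (t.2.1 ≠ some t.1.1) || decide (t.2.2 ≠ some t.1.1))).map (fun t => t.1)

-- ===== PRECONDITION & SPEC =====
def Spec_x_sort (points : List (Int × Int)) (out : List (Int × Int)) : Prop := out = x_sort_alt points
instance (points : List (Int × Int)) (out : List (Int × Int)) : Decidable (Spec_x_sort points out) := by unfold Spec_x_sort; infer_instance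

-- ===== CLAIM (what is proved, stated in full; the proofs are below) =====
def Claim_equal_x_sort : Prop := ∀ (points : List (Int × Int)), Dom_x_sort points → Spec_x_sort points (x_sort points)

-- ===== LEMMAS AND PROOFS =====

-- A's per-group contribution
def pvFA (pts : List (Int × Int)) : List (Int × Int) :=
  pts.headI :: (if pts.length > 1 ∧ pts.getLastD (0, 0) ≠ pts.headI then [pts.getLastD (0, 0)] else [])

theorem pv_foldA (gs : List (List (Int × Int))) (acc : List (Int × Int)) :
    gs.foldl (fun res pts =>
      let res := res ++ [pts.headI]
      if pts.length > 1 ∧ pts.getLastD (0, 0) ≠ pts.headI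
      then res ++ [pts.getLastD (0, 0)] else res) acc = acc ++ gs.flatMap pvFA := by
  induction gs generalizing acc with
  | nil => simp
  | cons g gs ih =>
    simp only [List.foldl_cons, List.flatMap_cons, ih, pvFA]
    split <;> simp

-- B's zip/filter pass, with the leading 'prev' generalized
def pvZ (a : Option Int) (u : List (Int × Int)) : List (Int × Int) :=
  ((u.zip ((a :: (u.map (fun p => p.1)).dropLast.map some).zip
           ((u.map (fun p => p.1)).tail.map some ++ [none]))).filter
    (fun t => decide (t.2.1 ≠ some t.1.1) || decide (t.2.2 ≠ some t.1.1))).map (fun t => t.1)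

-- the same pass written as a prev-carrying recursion
def pvScan (a : Option Int) : List (Int × Int) → List (Int × Int)
  | [] => []
  | p :: t =>
      (if a ≠ some p.1 ∨ t.head?.map (fun q => q.1) ≠ some p.1 then [p] else []) ++
      pvScan (some p.1) t

theorem pvZ_cons2 (a : Option Int) (p q : Int × Int) (t' : List (Int × Int)) :
    pvZ a (p :: q :: t')
      = (if (decide (a ≠ some p.1) || decide ((some q.1 : Option Int) ≠ some p.1)) = true
         then [p] else []) ++ pvZ (some p.1) (q :: t') := by
  simp only [pvZ, List.map_cons, List.dropLast_cons₂, List.tail_cons, List.cons_append,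
    List.zip_cons_cons]
  split
  · rename_i h
    rw [List.filter_cons_of_pos (by simpa using h), List.map_cons]
    rfl
  · rename_i h
    rw [List.filter_cons_of_neg (by simpa using h), List.nil_append]

theorem pvZ_eq_scan : ∀ (u : List (Int × Int)) (a : Option Int), pvZ a u = pvScan a u := by
  intro u
  induction u with
  | nil => intro a; rfl
  | cons p t ih =>
    intro a
    cases t with
    | nil =>
      show pvZ a [p] = pvScan a [p]
      rw [pvScan, if_pos (Or.inr (by simp))]
      simp [pvZ, pvScan]
    | cons q t' =>
      rw [pvZ_cons2, ih (some p.1)]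
      conv_rhs => rw [pvScan]
      simp only [List.head?_cons, Option.map_some]
      congr 1
      by_cases h : a = some p.1 <;> by_cases h2 : q.1 = p.1 <;> simp [h, h2]

theorem pv_getLastD_mem : ∀ (l : List (Int × Int)) (x d : Int × Int),
    (x :: l).getLastD d ∈ x :: l := by
  intro l
  induction l with
  | nil => intro x d; simp
  | cons y l ih => intro x d; rw [List.getLastD_cons]; exact List.mem_cons_of_mem x (ih y d)

theorem pv_scan_mid : ∀ (m : List (Int × Int)), m ≠ [] → ∀ (rest : List (Int × Int)) (c : Int),
    (∀ q ∈ m, q.1 = c) → rest.head?.map (fun q => q.1) ≠ some c →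
    pvScan (some c) (m ++ rest) = m.getLastD (0, 0) :: pvScan (some c) rest := by
  intro m
  induction m with
  | nil => intro h; exact absurd rfl h
  | cons q m ih =>
    intro _ rest c hall hrh
    have hq : q.1 = c := hall q (by simp)
    cases m with
    | nil =>
      show pvScan (some c) (q :: rest) = [q].getLastD (0, 0) :: pvScan (some c) rest
      conv_lhs => rw [pvScan]
      rw [if_pos (Or.inr (by simpa [hq] using hrh)), hq]
      rfl
    | cons q' m' =>
      have hq' : q'.1 = c := hall q' (by simp)
      have hstep := ih (by simp) rest c (fun r hr => hall r (by simp [hr])) hrh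
      show pvScan (some c) (q :: ((q' :: m') ++ rest))
          = (q :: q' :: m').getLastD (0, 0) :: pvScan (some c) rest
      conv_lhs => rw [pvScan]
      rw [if_neg (by simp [hq, hq']), List.nil_append, hq, hstep, List.getLastD_cons,
        List.getLastD_cons, List.getLastD_cons]

theorem pv_scan_block : ∀ (b : List (Int × Int)), b ≠ [] → ∀ (rest : List (Int × Int)) (a : Option Int) (c : Int),
    (∀ q ∈ b, q.1 = c) → a ≠ some c → rest.head?.map (fun q => q.1) ≠ some c →
    pvScan a (b ++ rest) =
      (b.headI :: (if 1 < b.length then [b.getLastD (0, 0)] else [])) ++ pvScan (some c) rest := by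
  intro b hb rest a c hall ha hrh
  cases b with
  | nil => exact absurd rfl hb
  | cons p b' =>
    have hp : p.1 = c := hall p (by simp)
    cases b' with
    | nil =>
      show pvScan a (p :: rest)
          = ([p].headI :: (if 1 < [p].length then [[p].getLastD (0, 0)] else []))
            ++ pvScan (some c) rest
      conv_lhs => rw [pvScan]
      rw [if_pos (Or.inl (by simp [hp, ha])), hp]
      simp [List.headI]
    | cons q b'' =>
      have hmid := pv_scan_mid (q :: b'') (by simp) rest c
        (fun r hr => hall r (by simp [hr])) hrh
      show pvScan a (p :: ((q :: b'') ++ rest))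
          = ((p :: q :: b'').headI ::
              (if 1 < (p :: q :: b'').length then [(p :: q :: b'').getLastD (0, 0)] else []))
            ++ pvScan (some c) rest
      conv_lhs => rw [pvScan]
      rw [if_pos (Or.inl (by simp [hp, ha])), hp, hmid,
        if_pos (by simp : 1 < (p :: q :: b'').length), List.getLastD_cons,
        List.getLastD_cons, List.getLastD_cons]
      rfl

theorem pv_scan_prev_irrel : ∀ (u : List (Int × Int)) (a : Option Int),
    (∀ q ∈ u, some q.1 ≠ a) → pvScan a u = pvScan none u := by
  intro u a h
  cases u with
  | nil => rfl
  | cons p t =>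
    simp only [pvScan]
    rw [if_pos (Or.inl (Ne.symm (h p (by simp)))), if_pos (Or.inl (by simp))]

-- foldl Set.add only appends: result = seed ++ a sublist of the input
theorem pv_foldl_add_ex : ∀ (l s : List (Int × Int)),
    ∃ t, l.foldl PySem.Set.add s = s ++ t ∧ t.Sublist l := by
  intro l
  induction l with
  | nil => intro s; exact ⟨[], by simp, List.nil_sublist _⟩
  | cons x l ih =>
    intro s
    by_cases hx : x ∈ s
    · obtain ⟨t, ht, hs⟩ := ih s
      exact ⟨t, by simpa [PySem.Set.add_of_mem hx] using ht, hs.cons x⟩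
    · obtain ⟨t, ht, hs⟩ := ih (s ++ [x])
      exact ⟨x :: t, by simpa [PySem.Set.add_of_not_mem hx] using ht, hs.cons₂ x⟩

-- a prefix no processed element belongs to commutes out of foldl Set.add
theorem pv_foldl_add_shift : ∀ (l s t : List (Int × Int)), (∀ y ∈ l, y ∉ s) →
    l.foldl PySem.Set.add (s ++ t) = s ++ l.foldl PySem.Set.add t := by
  intro l
  induction l with
  | nil => intro s t _; rfl
  | cons x l ih =>
    intro s t h
    have hx : x ∉ s := h x (by simp)
    have hadd : PySem.Set.add (s ++ t) x = s ++ PySem.Set.add t x := by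
      by_cases hxt : x ∈ t
      · rw [PySem.Set.add_of_mem (by simp [hxt]), PySem.Set.add_of_mem hxt]
      · rw [PySem.Set.add_of_not_mem (by simp [hx, hxt]), PySem.Set.add_of_not_mem hxt,
          List.append_assoc]
    simp only [List.foldl_cons, hadd]
    exact ih s (PySem.Set.add t x) (fun y hy => h y (by simp [hy]))

theorem pv_ofList_append_disjoint (l₁ l₂ : List (Int × Int)) (h : ∀ y ∈ l₂, y ∉ l₁) :
    PySem.Set.ofList (l₁ ++ l₂) = PySem.Set.ofList l₁ ++ PySem.Set.ofList l₂ := by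
  rw [PySem.Set.ofList_eq_foldl, PySem.Set.ofList_eq_foldl, PySem.Set.ofList_eq_foldl,
    List.foldl_append]
  have h2 : ∀ y ∈ l₂, y ∉ l₁.foldl PySem.Set.add [] := by
    intro y hy
    rw [← PySem.Set.ofList_eq_foldl, PySem.Set.mem_ofList]
    exact h y hy
  calc l₂.foldl PySem.Set.add (l₁.foldl PySem.Set.add [])
      = l₂.foldl PySem.Set.add (l₁.foldl PySem.Set.add [] ++ []) := by simp
    _ = l₁.foldl PySem.Set.add [] ++ l₂.foldl PySem.Set.add [] :=
        pv_foldl_add_shift l₂ _ [] h2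

theorem pv_ofList_sublist (l : List (Int × Int)) : (PySem.Set.ofList l).Sublist l := by
  obtain ⟨t, ht, hs⟩ := pv_foldl_add_ex l []
  rw [PySem.Set.ofList_eq_foldl, ht]
  simpa using hs

-- last element of a ≤-sorted list is an upper bound
theorem pv_last_max : ∀ (g : List (Int × Int)),
    g.Pairwise (fun a b => toLex a ≤ toLex b) →
    ∀ y ∈ g, toLex y ≤ toLex (g.getLastD (0, 0)) := by
  intro g
  induction g with
  | nil => intro _ y hy; simp at hy
  | cons a t ih =>
    intro hpw y hy
    obtain ⟨ha, ht⟩ := List.pairwise_cons.mp hpw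
    cases t with
    | nil => simp at hy; simp [hy]
    | cons b t' =>
      rw [List.getLastD_cons]
      rcases List.mem_cons.mp hy with rfl | hy'
      · exact le_trans (ha b (by simp))
          (ih ht b (by simp))
      · exact ih ht y hy'

-- in a strictly sorted list, an upper bound that is a member is the last element
theorem pv_last_of_strict : ∀ (u : List (Int × Int)) (z : Int × Int),
    u.Pairwise (fun a b => toLex a < toLex b) → z ∈ u →
    (∀ y ∈ u, toLex y ≤ toLex z) → u.getLastD (0, 0) = z := by
  intro u
  induction u with
  | nil => intro z _ hz; simp at hz
  | cons a t ih =>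
    intro z hpw hz hub
    obtain ⟨ha, ht⟩ := List.pairwise_cons.mp hpw
    cases t with
    | nil => simp at hz; simp [hz]
    | cons b t' =>
      rw [List.getLastD_cons]
      rcases List.mem_cons.mp hz with rfl | hz'
      · exfalso
        have h1 : toLex z < toLex b := ha b (by simp)
        have h2 : toLex b ≤ toLex z := hub b (by simp)
        exact absurd (lt_of_lt_of_le h1 h2) (lt_irrefl _)
      · exact ih z ht hz' (fun y hy => hub y (by simp [hy]))

-- the keys strictly after a run of x = p.1 are all different from p.1
theorem pv_rest_keys (p : Int × Int) (t : List (Int × Int))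
    (h : List.Pairwise (fun a b : Int × Int => a.1 ≤ b.1) (p :: t)) :
    ∀ q ∈ t.dropWhile (fun q => q.1 == p.1), q.1 ≠ p.1 := by
  intro q hqmem
  rw [List.pairwise_cons] at h
  obtain ⟨hp, ht⟩ := h
  cases hr : t.dropWhile (fun q : Int × Int => q.1 == p.1) with
  | nil => simp [hr] at hqmem
  | cons r₀ r' =>
    have hr0ne : (r₀.1 == p.1) = false := by
      have hne : t.dropWhile (fun q : Int × Int => q.1 == p.1) ≠ [] :=
        hr ▸ List.cons_ne_nil _ _
      have := List.head_dropWhile_not (fun q : Int × Int => q.1 == p.1) hne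
      simpa [hr] using this
    have hr0 : r₀.1 ≠ p.1 := by simpa using hr0ne
    have hr0mem : r₀ ∈ t := (List.dropWhile_sublist _).mem (by rw [hr]; exact List.mem_cons_self ..)
    have h1' : p.1 < r₀.1 := lt_of_le_of_ne (hp r₀ hr0mem) (fun hh => hr0 hh.symm)
    rw [hr] at hqmem
    rcases List.mem_cons.mp hqmem with rfl | hq'
    · exact fun hh => hr0 hh
    · have hpw : List.Pairwise (fun a b : Int × Int => a.1 ≤ b.1) (r₀ :: r') := by
        have hsub : (r₀ :: r').Sublist t := by rw [← hr]; exact List.dropWhile_sublist _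
        exact List.Pairwise.sublist hsub ht
      have h2 : r₀.1 ≤ q.1 := (List.pairwise_cons.mp hpw).1 q hq'
      intro hh; omega

theorem pv_main : ∀ (n : Nat) (s : List (Int × Int)), s.length ≤ n →
    List.Pairwise (fun a b : Int × Int => toLex a ≤ toLex b) s →
    (pyGroupbyFst s).flatMap pvFA = pvScan none (PySem.Set.ofList s) := by
  intro n
  induction n with
  | zero =>
    intro s hs _
    have hnil : s = [] := List.eq_nil_of_length_eq_zero (Nat.le_zero.mp hs)
    subst hnil
    rw [pyGroupbyFst]; rfl
  | succ n ih =>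
    intro s hs hpw
    cases s with
    | nil => rw [pyGroupbyFst]; rfl
    | cons p t =>
      have hpw1 : List.Pairwise (fun a b : Int × Int => a.1 ≤ b.1) (p :: t) :=
        hpw.imp (fun hab => by
          rcases Prod.Lex.le_iff.mp hab with h | ⟨h, _⟩
          · exact le_of_lt h
          · exact le_of_eq h)
      -- the first group and the remainder
      have htw : ∀ q ∈ t.takeWhile (fun q : Int × Int => q.1 == p.1), q.1 = p.1 := by
        intro q hq; simpa using List.mem_takeWhile_imp hq
      have hrest := pv_rest_keys p t hpw1
      have hgx : ∀ q ∈ p :: t.takeWhile (fun q : Int × Int => q.1 == p.1), q.1 = p.1 := by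
        intro q hq
        rcases List.mem_cons.mp hq with rfl | hq'
        · rfl
        · exact htw q hq'
      have hsplit : p :: t
          = (p :: t.takeWhile (fun q : Int × Int => q.1 == p.1))
            ++ t.dropWhile (fun q : Int × Int => q.1 == p.1) := by
        simp [List.takeWhile_append_dropWhile]
      have hgsub : (p :: t.takeWhile (fun q : Int × Int => q.1 == p.1)).Sublist (p :: t) :=
        (List.takeWhile_sublist _).cons₂ p
      have hgpw : (p :: t.takeWhile (fun q : Int × Int => q.1 == p.1)).Pairwise
          (fun a b => toLex a ≤ toLex b) := hpw.sublist hgsub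
      -- split the deduplication at the group boundary
      have hdisj : ∀ y ∈ t.dropWhile (fun q : Int × Int => q.1 == p.1),
          y ∉ p :: t.takeWhile (fun q : Int × Int => q.1 == p.1) := by
        intro y hy hmem
        exact hrest y hy (hgx y hmem)
      have hofsplit : PySem.Set.ofList (p :: t)
          = PySem.Set.ofList (p :: t.takeWhile (fun q : Int × Int => q.1 == p.1))
            ++ PySem.Set.ofList (t.dropWhile (fun q : Int × Int => q.1 == p.1)) := by
        conv_lhs => rw [hsplit]
        exact pv_ofList_append_disjoint _ _ hdisj
      -- structure of the deduplicated group
      have hofg : ∃ t', PySem.Set.ofList (p :: t.takeWhile (fun q : Int × Int => q.1 == p.1))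
          = p :: t' ∧ t'.Sublist (t.takeWhile (fun q : Int × Int => q.1 == p.1)) := by
        obtain ⟨t', ht', hs'⟩ := pv_foldl_add_ex (t.takeWhile (fun q : Int × Int => q.1 == p.1)) [p]
        refine ⟨t', ?_, hs'⟩
        rw [PySem.Set.ofList_eq_foldl, List.foldl_cons,
          PySem.Set.add_of_not_mem (by simp : p ∉ ([] : List (Int × Int)))]
        simpa using ht'
      obtain ⟨t', hofgeq, ht'sub⟩ := hofg
      have hogsub : (PySem.Set.ofList
          (p :: t.takeWhile (fun q : Int × Int => q.1 == p.1))).Sublist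
          (p :: t.takeWhile (fun q : Int × Int => q.1 == p.1)) :=
        pv_ofList_sublist _
      have hogmem : ∀ y ∈ PySem.Set.ofList (p :: t.takeWhile (fun q : Int × Int => q.1 == p.1)),
          y ∈ p :: t.takeWhile (fun q : Int × Int => q.1 == p.1) := fun y hy => hogsub.mem hy
      have hogx : ∀ q ∈ PySem.Set.ofList (p :: t.takeWhile (fun q : Int × Int => q.1 == p.1)),
          q.1 = p.1 := fun q hq => hgx q (hogmem q hq)
      have hognodup := PySem.Set.nodup_ofList (p :: t.takeWhile (fun q : Int × Int => q.1 == p.1))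
      have hogpw : (PySem.Set.ofList (p :: t.takeWhile (fun q : Int × Int => q.1 == p.1))).Pairwise
          (fun a b => toLex a < toLex b) := by
        have hle := hgpw.sublist hogsub
        have hne : (PySem.Set.ofList
            (p :: t.takeWhile (fun q : Int × Int => q.1 == p.1))).Pairwise (· ≠ ·) := hognodup
        exact (hle.and hne).imp (fun ⟨h1, h2⟩ =>
          lt_of_le_of_ne h1 (fun hc => h2 (by
            have := congrArg (fun z => (ofLex z : Int × Int)) hc
            simpa using this)))
      -- head of the deduplicated remainder has a different key
      have hresthead : ((PySem.Set.ofList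
          (t.dropWhile (fun q : Int × Int => q.1 == p.1))).head?.map (fun q => q.1))
          ≠ some p.1 := by
        cases hr : (PySem.Set.ofList (t.dropWhile (fun q : Int × Int => q.1 == p.1))) with
        | nil => simp
        | cons r rr =>
          have hrmem : r ∈ t.dropWhile (fun q : Int × Int => q.1 == p.1) :=
            (pv_ofList_sublist _).mem (by rw [hr]; exact List.mem_cons_self ..)
          simpa using hrest r hrmem
      -- apply the block lemma, then the prev-irrelevance lemma, then the IH
      rw [pyGroupbyFst, List.flatMap_cons, hofsplit,
        pv_scan_block _ (by rw [hofgeq]; simp) _ none p.1 hogx (by simp) hresthead,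
        pv_scan_prev_irrel _ (some p.1) (fun q hq => by
          have hqmem : q ∈ t.dropWhile (fun q : Int × Int => q.1 == p.1) :=
            (pv_ofList_sublist _).mem hq
          simpa using hrest q hqmem),
        ← ih (t.dropWhile (fun q : Int × Int => q.1 == p.1))
          (by
            have h1 := List.length_dropWhile_le (fun q : Int × Int => q.1 == p.1) t
            simp only [List.length_cons] at hs
            omega)
          (hpw.sublist (List.Sublist.cons _ (List.dropWhile_sublist _)))]
      -- per-group: pvFA of the raw group = head/boundary contribution of the dedup'd group
      congr 1
      rw [hofgeq]
      cases t' with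
      | nil =>
        -- every point of the group equals p
        have halleq : ∀ y ∈ p :: t.takeWhile (fun q : Int × Int => q.1 == p.1), y = p := by
          intro y hy
          have : y ∈ PySem.Set.ofList (p :: t.takeWhile (fun q : Int × Int => q.1 == p.1)) :=
            (PySem.Set.mem_ofList _ _).mpr hy
          rw [hofgeq] at this
          simpa using this
        have hlast : (p :: t.takeWhile (fun q : Int × Int => q.1 == p.1)).getLastD (0, 0) = p :=
          halleq _ (pv_getLastD_mem _ _ _)
        simp only [pvFA, List.headI]
        rw [if_neg (fun hc => hc.2 hlast), if_neg (by simp : ¬ (1 < ([p] : List (Int × Int)).length))]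
      | cons y t'' =>
        have hyg : y ∈ p :: t.takeWhile (fun q : Int × Int => q.1 == p.1) :=
          hogmem y (by rw [hofgeq]; simp)
        have hynp : y ≠ p := by
          have := hognodup
          rw [hofgeq] at this
          rcases List.pairwise_cons.mp this with ⟨hp', _⟩
          exact fun hc => (hp' y (by simp)) hc.symm
        have hytw : y ∈ t.takeWhile (fun q : Int × Int => q.1 == p.1) := by
          rcases List.mem_cons.mp hyg with rfl | hy'
          · exact absurd rfl hynp
          · exact hy'
        have hglen : 1 < (p :: t.takeWhile (fun q : Int × Int => q.1 == p.1)).length := by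
          cases htww : t.takeWhile (fun q : Int × Int => q.1 == p.1) with
          | nil => rw [htww] at hytw; simp at hytw
          | cons w ws => simp
        have hLmem : (p :: t.takeWhile (fun q : Int × Int => q.1 == p.1)).getLastD (0, 0)
            ∈ p :: t.takeWhile (fun q : Int × Int => q.1 == p.1) := pv_getLastD_mem _ _ _
        have hLne : (p :: t.takeWhile (fun q : Int × Int => q.1 == p.1)).getLastD (0, 0) ≠ p := by
          intro hc
          have h1 : toLex y ≤ toLex ((p :: t.takeWhile
              (fun q : Int × Int => q.1 == p.1)).getLastD (0, 0)) :=
            pv_last_max _ hgpw y hyg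
          rw [hc] at h1
          have h2 : toLex p ≤ toLex y := (List.pairwise_cons.mp hgpw).1 y hytw
          exact hynp (by
            have := le_antisymm h1 h2
            have := congrArg (fun z => (ofLex z : Int × Int)) this
            simpa using this)
        have hLog : (p :: t.takeWhile (fun q : Int × Int => q.1 == p.1)).getLastD (0, 0)
            ∈ PySem.Set.ofList (p :: t.takeWhile (fun q : Int × Int => q.1 == p.1)) :=
          (PySem.Set.mem_ofList _ _).mpr hLmem
        have hoglast := pv_last_of_strict _ _ hogpw hLog
          (fun w hw => pv_last_max _ hgpw w (hogmem w hw))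
        rw [hofgeq] at hoglast
        simp only [pvFA, List.headI]
        rw [if_pos ⟨hglen, hLne⟩, if_pos (by simp : 1 < (p :: y :: t'').length), hoglast]

theorem pv_pairwise_lex (points : List (Int × Int)) :
    List.Pairwise (fun a b : Int × Int => toLex a ≤ toLex b)
      (PySem.List.sorted points (fun p => toLex p)) :=
  PySem.List.sorted_pairwise points (fun p : Int × Int => toLex p)

-- sorted(set(s)) for an already sorted s is just the dedup
theorem pv_sorted_ofList (s : List (Int × Int))
    (h : List.Pairwise (fun a b : Int × Int => toLex a ≤ toLex b) s) :
    PySem.List.sorted (PySem.Set.ofList s) (fun p => toLex p) = PySem.Set.ofList s :=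
  PySem.List.sorted_eq_self_of_pairwise _ _ (h.sublist (pv_ofList_sublist s))

-- ===== VERDICT (by name: the statement is the Claim_ definition above) =====
theorem x_sort_spec : Claim_equal_x_sort := by
  intro points _
  unfold Spec_x_sort x_sort x_sort_alt
  rw [pv_foldA]
  simp only [List.nil_append]
  have hz : ∀ (u : List (Int × Int)),
      ((u.zip (((none : Option Int) :: (u.map (fun p => p.1)).dropLast.map some).zip
        ((u.map (fun p => p.1)).tail.map some ++ [none]))).filter
        (fun t => decide (t.2.1 ≠ some t.1.1) || decide (t.2.2 ≠ some t.1.1))).map (fun t => t.1)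
      = pvScan none u := fun u => pvZ_eq_scan u none
  rw [hz, pv_sorted_ofList _ (pv_pairwise_lex points)]
  exact pv_main (PySem.List.sorted points (fun p => toLex p)).length _ le_rfl
    (pv_pairwise_lex points)
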